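-- pv_equiv track=rewrite | github.com/JofredG/CodePath_Org_Technical_Interview_Prep101 | u3.s2.v1.py | sum_of_unique_elements
-- ===== SOURCE A (Python) =====
-- def sum_of_unique_elements(lst1, lst2):
--     d:dict = {}
--     summation:int = 0
--     for i in range(len(lst1)):
--         if lst1[i] not in d:
--             d[lst1[i]] = 1
--         else:
--             d[lst1[i]] += 1
--     for element in d:
--         if d[element] == 1 and element not in lst2:
--             summation += element
--     return summation
-- ===== SOURCE B (Python) =====
-- def sum_of_unique_elements(lst1, lst2):
--     s = sorted(lst1)
--     total = 0
--     i = 0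
--     n = len(s)
--     while i < n:
--         j = i + 1
--         while j < n and s[j] == s[i]:
--             j += 1
--         if j == i + 1 and s[i] not in lst2:
--             total += s[i]
--         i = j
--     return total
-- ===== Notes on version B (the rewrite author's own statement) =====
-- stated objective: alternative
-- what changed: Replaces the frequency dict and key scan by sort-then-run-scan: sort lst1, walk it with two pointers grouping runs of equal elements, and add an element exactly when its run has length 1 and it is not in lst2 (summation order over ints does not affect the result).
import Mathlib
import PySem

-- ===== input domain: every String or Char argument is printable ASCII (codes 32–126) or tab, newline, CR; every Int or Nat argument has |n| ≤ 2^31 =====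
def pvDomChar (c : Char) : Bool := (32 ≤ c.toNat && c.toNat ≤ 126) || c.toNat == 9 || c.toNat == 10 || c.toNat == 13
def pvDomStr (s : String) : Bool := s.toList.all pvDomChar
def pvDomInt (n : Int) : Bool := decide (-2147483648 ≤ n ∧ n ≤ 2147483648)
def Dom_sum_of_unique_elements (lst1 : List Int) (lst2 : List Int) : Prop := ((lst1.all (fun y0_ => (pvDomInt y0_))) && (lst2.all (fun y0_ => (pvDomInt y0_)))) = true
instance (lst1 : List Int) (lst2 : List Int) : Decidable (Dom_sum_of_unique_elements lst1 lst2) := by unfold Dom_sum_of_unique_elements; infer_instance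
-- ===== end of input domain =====

-- B replaces A's frequency dict + key scan by sort-then-run-scan: sort lst1 and walk
-- runs of equal elements, adding singleton-run elements not in lst2 (objective: alternative).

-- ===== PORT A =====
def sum_of_unique_elements (lst1 : List Int) (lst2 : List Int) : Int :=
  let d : PySem.Dict Int Int :=
    (PySem.List.pyRange 0 (PySem.List.len lst1)).foldl
      (fun d i =>
        if d.contains (PySem.List.pyGetD lst1 i 0) then
          d.modify (PySem.List.pyGetD lst1 i 0) 0 (· + 1)
        else
          d.insert (PySem.List.pyGetD lst1 i 0) 1)
      PySem.Dict.empty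
  -- indices from range(len(lst1)) are always in range, so pyGetD's default 0 is never used
  d.keys.foldl (fun summation element =>
    if d.getD element 0 == 1 && !lst2.contains element then summation + element else summation) 0

-- ===== PORT B =====
-- outer while loop of Source B: the remaining suffix of the sorted list is the loop state;
-- the inner 'while s[j] == s[i]' scan is the takeWhile/dropWhile split of that suffix
def pvGo (lst2 : List Int) : List Int → Int → Int
  | [], total => total
  | x :: ys, total =>
    let run := ys.takeWhile (fun y => y == x)
    let rest := ys.dropWhile (fun y => y == x)
    pvGo lst2 rest (if run.length == 0 && !lst2.contains x then total + x else total)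
  termination_by s _ => s.length
  decreasing_by simpa using Nat.lt_succ_of_le (List.length_dropWhile_le _ ys)

def sum_of_unique_elements_alt (lst1 : List Int) (lst2 : List Int) : Int :=
  pvGo lst2 (PySem.List.sorted lst1 (fun x => x) false) 0

-- ===== PRECONDITION & SPEC =====
def Spec_sum_of_unique_elements (lst1 : List Int) (lst2 : List Int) (out : Int) : Prop := out = sum_of_unique_elements_alt lst1 lst2
instance (lst1 : List Int) (lst2 : List Int) (out : Int) : Decidable (Spec_sum_of_unique_elements lst1 lst2 out) := by unfold Spec_sum_of_unique_elements; infer_instance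

-- ===== CLAIM (what is proved, stated in full; the proofs are below) =====
def Claim_equal_sum_of_unique_elements : Prop := ∀ (lst1 : List Int) (lst2 : List Int), Dom_sum_of_unique_elements lst1 lst2 → Spec_sum_of_unique_elements lst1 lst2 (sum_of_unique_elements lst1 lst2)

-- ===== LEMMAS AND PROOFS =====

-- A's branch on membership is exactly Counter's modify step.
theorem pv_branch_eq_modify (d : PySem.Dict Int Int) (x : Int) :
    (if d.contains x then d.modify x 0 (· + 1) else d.insert x 1)
      = d.modify x 0 (· + 1) := by
  by_cases h : d.contains x = true
  · simp [h]
  · have h' : d.contains x = false := by simpa using h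
    simp [h', PySem.Dict.modify, PySem.Dict.getD_of_not_contains d 0 h']

-- A's dict is Counter(lst1).
theorem pv_dict_eq_counter (lst1 : List Int) :
    (PySem.List.pyRange 0 (PySem.List.len lst1)).foldl
      (fun d i =>
        if d.contains (PySem.List.pyGetD lst1 i 0) then
          d.modify (PySem.List.pyGetD lst1 i 0) 0 (· + 1)
        else
          d.insert (PySem.List.pyGetD lst1 i 0) 1)
      PySem.Dict.empty = PySem.Dict.counter lst1 := by
  refine (PySem.List.foldl_pyRange_pyGetD lst1 0
    (fun (d : PySem.Dict Int Int) x => if d.contains x then d.modify x 0 (· + 1) else d.insert x 1)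
    PySem.Dict.empty (a := 0) le_rfl).trans ?_
  simp only [Int.toNat_zero, List.drop_zero]
  rw [PySem.List.foldl_congr_mem lst1 _ (fun d x => d.modify x 0 (· + 1))
    PySem.Dict.empty (fun acc x _ => pv_branch_eq_modify acc x)]
  exact (PySem.Dict.counter_eq_foldl lst1).symm

-- the two filtered lists hold the same elements with the same multiplicities
theorem pv_filters_perm (lst1 : List Int) (p : Int → Bool)
    (hp : ∀ x, p x = true → lst1.count x = 1) :
    ((PySem.Set.ofList lst1).filter p).Perm (lst1.filter p) := by
  rw [List.perm_iff_count]
  intro a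
  by_cases ha : p a = true
  · rw [List.count_filter ha, List.count_filter ha]
    by_cases hm : a ∈ lst1
    · rw [hp a ha,
        List.count_eq_one_of_mem (PySem.Set.nodup_ofList lst1)
          ((PySem.Set.mem_ofList lst1 a).mpr hm)]
    · rw [List.count_eq_zero.mpr hm,
        List.count_eq_zero.mpr (fun h => hm ((PySem.Set.mem_ofList lst1 a).mp h))]
  · have ha' : p a = false := by simpa using ha
    rw [List.count_eq_zero.mpr, List.count_eq_zero.mpr] <;>
      exact fun h => by simpa [ha'] using (List.mem_filter.mp h).2

-- an 'if p x: s += x' loop is the sum of the filtered list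
theorem pv_foldl_if_add_eq_sum_filter (l : List Int) (p : Int → Bool) :
    l.foldl (fun s x => if p x then s + x else s) 0 = (l.filter p).sum := by
  rw [PySem.List.foldl_if_eq_foldl_filter p (fun s x => s + x)]
  simpa using PySem.List.foldl_add (l.filter p) (fun x : Int => x) 0

-- the first element of a dropWhile result fails the predicate
theorem pv_dropWhile_head_false (p : Int → Bool) :
    ∀ (l : List Int) (a : Int) (l' : List Int), l.dropWhile p = a :: l' → p a = false := by
  intro l
  induction l with
  | nil => intro a l' h; simp at h
  | cons b bs ih =>
    intro a l' h
    by_cases hb : p b = true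
    · exact ih a l' (by simpa [List.dropWhile, hb] using h)
    · have hb' : p b = false := by simpa using hb
      rw [List.dropWhile, hb'] at h
      obtain ⟨rfl, rfl⟩ := by exact List.cons.injEq .. ▸ h
      exact hb'

-- run-scan over a sorted list sums exactly the count-1 elements not in lst2
theorem pvGo_sum (lst2 : List Int) :
    ∀ (n : Nat) (s : List Int), s.length ≤ n → s.Pairwise (· ≤ ·) → ∀ total : Int,
      pvGo lst2 s total
        = total + (s.filter (fun z => s.count z == 1 && !lst2.contains z)).sum := by
  intro n
  induction n with
  | zero =>
    intro s hs _ total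
    have : s = [] := List.length_eq_zero_iff.mp (Nat.le_zero.mp hs)
    subst this; simp [pvGo]
  | succ n ih =>
    intro s hs hp total
    cases s with
    | nil => simp [pvGo]
    | cons x ys =>
      set q : Int → Bool := fun y => y == x with hq
      set run := ys.takeWhile q with hrun
      set rest := ys.dropWhile q with hrest
      have hsplit : run ++ rest = ys := List.takeWhile_append_dropWhile
      have hrunx : ∀ y ∈ run, y = x := by
        intro y hy
        have := List.mem_takeWhile_imp hy
        simpa [hq] using this
      have hxys : ∀ y ∈ ys, x ≤ y := (List.pairwise_cons.mp hp).1
      have hysp : ys.Pairwise (· ≤ ·) := (List.pairwise_cons.mp hp).2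
      have hrestp : rest.Pairwise (· ≤ ·) :=
        hysp.sublist (List.dropWhile_sublist q)
      have hxrest : x ∉ rest := by
        cases hr : rest with
        | nil => simp
        | cons r rs =>
          have hrq : q r = false := pv_dropWhile_head_false q ys r rs (hrest ▸ hr)
          have hrx : r ≠ x := by simpa [hq] using hrq
          have hrys : r ∈ ys := by
            rw [← hsplit]; exact List.mem_append.mpr (Or.inr (hr ▸ List.mem_cons_self))
          have hxr : x < r := lt_of_le_of_ne (hxys r hrys) (Ne.symm hrx)
          intro hmem
          rcases List.mem_cons.mp (show x ∈ r :: rs from hr ▸ hmem) with h1 | h2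
          · exact absurd h1.symm (ne_of_gt hxr)
          · have := (List.pairwise_cons.mp (hr ▸ hrestp)).1 x h2
            omega
      have hcountx : (x :: ys).count x = 1 + run.length := by
        have h1 : run.count x = run.length :=
          List.count_eq_length.mpr (fun b hb => by simp [hrunx b hb])
        have h2 : rest.count x = 0 := List.count_eq_zero.mpr hxrest
        rw [List.count_cons_self, ← hsplit, List.count_append, h1, h2]
        omega
      have hcountz : ∀ z, z ≠ x → (x :: ys).count z = rest.count z := by
        intro z hz
        have h1 : run.count z = 0 :=
          List.count_eq_zero.mpr (fun h => hz (hrunx z h))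
        rw [← hsplit]
        have hz' : ¬ (x = z) := fun h => hz h.symm
        simp [List.count_cons, List.count_append, h1, hz, hz']
      have hlen : rest.length ≤ n := by
        have h1 : rest.length ≤ ys.length := List.length_dropWhile_le q ys
        simp only [List.length_cons] at hs
        omega
      have hIH := ih rest hlen hrestp
      set p : Int → Bool := fun z => (x :: ys).count z == 1 && !lst2.contains z with hpdef
      set pr : Int → Bool := fun z => rest.count z == 1 && !lst2.contains z with hprdef
      have hfilter_rest : rest.filter pr = rest.filter p := by
        apply List.filter_congr
        intro z hz
        have hzx : z ≠ x := fun h => hxrest (h ▸ hz)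
        simp [hpdef, hprdef, hcountz z hzx]
      have hfilter_run : run.filter p = [] := by
        apply List.filter_eq_nil_iff.mpr
        intro y hy
        rw [hrunx y hy]
        have : run ≠ [] := by intro h; rw [h] at hy; simp at hy
        have hlen2 : 1 ≤ run.length := List.length_pos_iff.mpr this
        simp only [hpdef, Bool.and_eq_true, beq_iff_eq, not_and]
        intro hc
        omega
      have hstep : pvGo lst2 (x :: ys) total
          = pvGo lst2 rest (if run.length == 0 && !lst2.contains x then total + x else total) := by
        rw [pvGo]
      rw [hstep, hIH]
      have hsfilter : (x :: ys).filter p = (x :: run).filter p ++ rest.filter p := by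
        rw [← List.filter_append]
        rw [show (x :: run) ++ rest = x :: ys from by rw [List.cons_append, hsplit]]
      rw [hsfilter]
      cases hr0 : run with
      | nil =>
        have hpx : p x = !lst2.contains x := by
          simp only [hpdef, hcountx, hr0]
          simp
        by_cases hc : lst2.contains x = true
        · have hm : x ∈ lst2 := by simpa using hc
          simp [hr0, hpx, hc, hfilter_rest, List.filter_cons, hm]
        · have hc' : lst2.contains x = false := by simpa using hc
          simp only [hr0, List.length_nil, beq_self_eq_true, hc', Bool.not_false,
            Bool.and_self, if_true]
          rw [List.filter_cons]
          simp only [hpx, hc', Bool.not_false, if_true]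
          rw [hr0] at hfilter_run
          simp only [List.filter_nil] at hfilter_run
          simp [hfilter_rest]
          ring
      | cons r rs =>
        have hpx : p x = false := by
          have hc1 : List.count x (x :: ys) ≠ 1 := by
            rw [hcountx, hr0]
            simp only [List.length_cons]
            omega
          rw [hpdef]
          simp only [Bool.and_eq_false_iff, beq_eq_false_iff_ne, ne_eq]
          exact Or.inl hc1
        have h0 : (((r :: rs).length == 0) && !lst2.contains x) = false := by simp
        rw [h0]
        simp only [Bool.false_eq_true, if_false]
        rw [List.filter_cons]
        simp only [hpx, if_false]
        rw [← hr0, hfilter_run]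
        simp [hfilter_rest]

-- ===== VERDICT (by name: the statement is the Claim_ definition above) =====
theorem sum_of_unique_elements_spec : Claim_equal_sum_of_unique_elements := by
  intro lst1 lst2 _
  unfold Spec_sum_of_unique_elements sum_of_unique_elements sum_of_unique_elements_alt
  simp only [pv_dict_eq_counter, PySem.Dict.keys_counter]
  set t := PySem.List.sorted lst1 (fun x => x) false with ht
  have hperm : t.Perm lst1 := PySem.List.sorted_perm lst1 (fun x => x) false
  have hpw : t.Pairwise (· ≤ ·) := by
    have := PySem.List.sorted_pairwise lst1 (fun x : Int => x)
    simpa using this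
  set p : Int → Bool := fun z => lst1.count z == 1 && !lst2.contains z with hp
  have hB : pvGo lst2 t 0 = (t.filter p).sum := by
    rw [pvGo_sum lst2 t.length t le_rfl hpw 0]
    have : t.filter (fun z => t.count z == 1 && !lst2.contains z) = t.filter p := by
      apply List.filter_congr
      intro z _
      simp [hp, hperm.count_eq z]
    rw [this]; ring
  have hA : ((PySem.Set.ofList lst1).foldl (fun summation element =>
      if (PySem.Dict.counter lst1).getD element 0 == 1 && !lst2.contains element
      then summation + element else summation) 0) = (lst1.filter p).sum := by
    have hcond : ∀ (s z : Int), z ∈ PySem.Set.ofList lst1 →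
        (if (PySem.Dict.counter lst1).getD z 0 == 1 && !lst2.contains z then s + z else s)
          = (if p z then s + z else s) := by
      intro s z _
      rw [PySem.Dict.getD_counter lst1 z]
      simp [hp, beq_iff_eq]
    rw [PySem.List.foldl_congr_mem (PySem.Set.ofList lst1) _
      (fun s z => if p z then s + z else s) 0 hcond]
    rw [pv_foldl_if_add_eq_sum_filter]
    exact (pv_filters_perm lst1 p (fun z hz => by
      simpa using (Bool.and_eq_true_iff.mp hz).1)).sum_eq
  rw [hA, hB]
  exact ((hperm.filter p).sum_eq).symm
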